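-- pv_equiv track=rewrite | github.com/FDlucifer/python-climb-learning-tutorial | advanced-python-tutorial/Recursion/main.py | count_zeros_recursively
-- ===== SOURCE A (Python) =====
-- def count_zeros_recursively(lst):
--     if len(lst) == 0:
--         return 0
--     if len(lst) == 1:
--         return 1 if lst[0] == 0 else 0
--     if lst[0] == 0:
--         return 1 + count_zeros_recursively(lst[1:])
--     else:
--         return 0 + count_zeros_recursively(lst[1:])
-- ===== SOURCE B (Python) =====
-- def count_zeros_recursively(lst):
--     count = 0
--     for x in lst:
--         if x == 0:
--             count += 1
--     return count
-- ===== Notes on version B (the rewrite author's own statement) =====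
-- stated objective: simpler
-- what changed: Replaced slicing recursion with a single iterative pass maintaining a counter.
import Mathlib
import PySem

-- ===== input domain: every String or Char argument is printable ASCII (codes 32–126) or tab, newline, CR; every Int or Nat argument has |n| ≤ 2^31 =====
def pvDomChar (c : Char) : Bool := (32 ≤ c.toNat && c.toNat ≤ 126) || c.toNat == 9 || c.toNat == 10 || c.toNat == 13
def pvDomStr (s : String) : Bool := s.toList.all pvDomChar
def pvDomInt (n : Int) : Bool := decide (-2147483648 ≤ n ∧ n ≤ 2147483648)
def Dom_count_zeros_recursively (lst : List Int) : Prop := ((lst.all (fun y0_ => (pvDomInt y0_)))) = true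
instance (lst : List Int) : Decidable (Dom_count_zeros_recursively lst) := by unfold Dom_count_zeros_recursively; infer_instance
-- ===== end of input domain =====

-- B replaces A's slicing recursion by one iterative pass with a counter (simpler, linear).

-- ===== PORT A =====
def count_zeros_recursively (lst : List Int) : Int :=
  if lst.length = 0 then 0
  else if lst.length = 1 then (if lst.headI = 0 then 1 else 0)
  else if lst.headI = 0 then 1 + count_zeros_recursively (PySem.List.slice lst (some 1) none)
  else 0 + count_zeros_recursively (PySem.List.slice lst (some 1) none)
termination_by lst.length
decreasing_by
  all_goals simp [PySem.List.slice_from_one]; omega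

-- ===== PORT B =====
def count_zeros_recursively_alt (lst : List Int) : Int :=
  lst.foldl (fun count x => if x = 0 then count + 1 else count) 0

-- ===== PRECONDITION & SPEC =====
def Spec_count_zeros_recursively (lst : List Int) (out : Int) : Prop := out = count_zeros_recursively_alt lst
instance (lst : List Int) (out : Int) : Decidable (Spec_count_zeros_recursively lst out) := by unfold Spec_count_zeros_recursively; infer_instance

-- ===== CLAIM (what is proved, stated in full; the proofs are below) =====
def Claim_equal_count_zeros_recursively : Prop := ∀ (lst : List Int), Dom_count_zeros_recursively lst → Spec_count_zeros_recursively lst (count_zeros_recursively lst)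

-- ===== LEMMAS AND PROOFS =====

theorem alt_shift (xs : List Int) (c : Int) :
    xs.foldl (fun count y => if y = 0 then count + 1 else count) c
      = c + xs.foldl (fun count y => if y = 0 then count + 1 else count) 0 := by
  induction xs generalizing c with
  | nil => simp
  | cons x xs ih =>
    simp only [List.foldl_cons]
    rw [ih, ih (if x = 0 then 0 + 1 else 0)]
    split_ifs <;> ring

theorem a_eq_b (lst : List Int) : count_zeros_recursively lst = count_zeros_recursively_alt lst := by
  induction lst with
  | nil => simp [count_zeros_recursively, count_zeros_recursively_alt]
  | cons x xs ih =>
    have hslice : PySem.List.slice (x :: xs) (some 1) none = xs := by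
      rw [PySem.List.slice_from_one]; rfl
    have halt : count_zeros_recursively_alt (x :: xs)
        = (if x = 0 then (0 : Int) + 1 else 0)
          + count_zeros_recursively_alt xs := by
      unfold count_zeros_recursively_alt
      simp only [List.foldl_cons]
      exact alt_shift xs _
    rw [count_zeros_recursively, hslice, ih, halt]
    cases xs with
    | nil =>
      simp only [count_zeros_recursively_alt, List.foldl_nil, List.length_cons,
        List.length_nil, List.headI]
      split_ifs <;> first | contradiction | omega
    | cons y ys =>
      simp only [List.length_cons, List.headI]
      split_ifs <;> first | contradiction | omega

-- ===== VERDICT (by name: the statement is the Claim_ definition above) =====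
theorem count_zeros_recursively_spec : Claim_equal_count_zeros_recursively := by
  intro lst _
  exact a_eq_b lst
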